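-- pv_equiv track=rewrite | github.com/wanfengqiang/PBVS-2024-Multi-modal-Aerial-View-Object-Classification-Challenge | results.py | cluster_image_id
-- ===== SOURCE A (Python) =====
-- def cluster_image_id(image_ids, threshold):
--     clusters = []
--     current_cluster = [image_ids[0]]
--     for i in range(1, len(image_ids)):
--         if abs(image_ids[i] - current_cluster[-1]) <= threshold:
--             current_cluster.append(image_ids[i])
--         else:
--             clusters.append(current_cluster)
--             current_cluster = [image_ids[i]]
--     clusters.append(current_cluster)
--     return clusters
-- ===== SOURCE B (Python) =====
-- def cluster_image_id(image_ids, threshold):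
--     # Pre_ excludes the empty list, on which A raises IndexError (image_ids[0]).
--     # Staged: first compute all break indices, then cut the list at them.
--     breaks = [i for i in range(1, len(image_ids))
--               if abs(image_ids[i] - image_ids[i - 1]) > threshold]
--     clusters = []
--     lo = 0
--     for b in breaks:
--         clusters.append(image_ids[lo:b])
--         lo = b
--     clusters.append(image_ids[lo:])
--     return clusters
-- ===== Notes on version B (the rewrite author's own statement) =====
-- stated objective: alternative
-- what changed: B is staged: it first computes the list of break indices (where the adjacent gap exceeds the threshold) and then cuts the input into slices at those indices, instead of A's online accumulator loop that grows/flushes a current cluster element by element; correct because A's current_cluster[-1] is always the previous element.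
import Mathlib
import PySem

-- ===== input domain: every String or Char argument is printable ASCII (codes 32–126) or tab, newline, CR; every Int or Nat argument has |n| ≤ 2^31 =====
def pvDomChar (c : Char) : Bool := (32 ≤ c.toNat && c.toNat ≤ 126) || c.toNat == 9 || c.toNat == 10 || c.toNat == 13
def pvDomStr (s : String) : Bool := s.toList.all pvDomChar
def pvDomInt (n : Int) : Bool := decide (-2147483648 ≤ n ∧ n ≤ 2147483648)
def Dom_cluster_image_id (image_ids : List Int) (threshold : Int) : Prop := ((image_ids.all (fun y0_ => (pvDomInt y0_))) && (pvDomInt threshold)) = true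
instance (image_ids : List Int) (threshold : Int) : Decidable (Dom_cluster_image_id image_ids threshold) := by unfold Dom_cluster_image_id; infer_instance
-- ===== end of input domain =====

-- B computes all break indices first and then cuts the list into slices at them (two staged passes),
-- instead of A's online accumulator loop; same O(n) cost ("alternative").

-- ===== PORT A =====
-- literal port of A: clusters/current_cluster state folded over image_ids[1:];
-- current_cluster[-1] → getLastD 0 (current_cluster is never empty).
-- On [] Python A raises IndexError (image_ids[0]); that input is outside Pre_ below.
def cluster_image_id (image_ids : List Int) (threshold : Int) : List (List Int) :=
  match image_ids with
  | [] => []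
  | x :: rest =>
    let s := rest.foldl
      (fun (s : List (List Int) × List Int) v =>
        if |v - s.2.getLastD 0| ≤ threshold then (s.1, s.2 ++ [v])
        else (s.1 ++ [s.2], [v]))
      ([], [x])
    s.1 ++ [s.2]

-- ===== PORT B =====
-- literal port of Source B: the break-index comprehension becomes a filter over pyRange 1 len
-- (indices i and i-1 lie in range there, so image_ids[i] → pyGetD is exact); the slicing loop
-- becomes a foldl over the break list carrying (clusters, lo); image_ids[lo:b] / image_ids[lo:]
-- are PySem.List.slice.
def cluster_image_id_alt (image_ids : List Int) (threshold : Int) : List (List Int) :=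
  let breaks := (PySem.List.pyRange 1 (image_ids.length : Int) 1).filter
    (fun i => decide (threshold < |PySem.List.pyGetD image_ids i 0 - PySem.List.pyGetD image_ids (i - 1) 0|))
  let s := breaks.foldl
    (fun (s : List (List Int) × Int) b =>
      (s.1 ++ [PySem.List.slice image_ids (some s.2) (some b)], b))
    ([], 0)
  s.1 ++ [PySem.List.slice image_ids (some s.2) none]

-- ===== PRECONDITION & SPEC =====
-- A raises IndexError on the empty list; Pre_ excludes exactly that input.
def Pre_cluster_image_id (image_ids : List Int) (threshold : Int) : Prop := image_ids ≠ []
instance (image_ids : List Int) (threshold : Int) : Decidable (Pre_cluster_image_id image_ids threshold) := by unfold Pre_cluster_image_id; infer_instance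
def pvWitness_cluster_image_id : List Int × Int := ([3, 4, 10, 11], 2)

def Spec_cluster_image_id (image_ids : List Int) (threshold : Int) (out : List (List Int)) : Prop := out = cluster_image_id_alt image_ids threshold
instance (image_ids : List Int) (threshold : Int) (out : List (List Int)) : Decidable (Spec_cluster_image_id image_ids threshold out) := by unfold Spec_cluster_image_id; infer_instance

-- ===== CLAIM (what is proved, stated in full; the proofs are below) =====
def Claim_equal_cluster_image_id : Prop := ∀ (image_ids : List Int) (threshold : Int), Dom_cluster_image_id image_ids threshold → Pre_cluster_image_id image_ids threshold → Spec_cluster_image_id image_ids threshold (cluster_image_id image_ids threshold)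

-- ===== LEMMAS AND PROOFS =====

-- A's loop step and B's two stages, named for the proofs (definitionally the ports' lambdas).
def pvStepA (t : Int) (s : List (List Int) × List Int) (v : Int) : List (List Int) × List Int :=
  if |v - s.2.getLastD 0| ≤ t then (s.1, s.2 ++ [v]) else (s.1 ++ [s.2], [v])

def pvBk (ids : List Int) (t : Int) : List Int :=
  (PySem.List.pyRange 1 (ids.length : Int) 1).filter
    (fun i => decide (t < |PySem.List.pyGetD ids i 0 - PySem.List.pyGetD ids (i - 1) 0|))

def pvStepB (ids : List Int) (s : List (List Int) × Int) (b : Int) : List (List Int) × Int :=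
  (s.1 ++ [PySem.List.slice ids (some s.2) (some b)], b)

lemma A_as_step (x : Int) (rest : List Int) (t : Int) :
    cluster_image_id (x :: rest) t =
      (rest.foldl (pvStepA t) ([], [x])).1 ++ [(rest.foldl (pvStepA t) ([], [x])).2] := rfl

lemma B_as_step (ids : List Int) (t : Int) :
    cluster_image_id_alt ids t =
      ((pvBk ids t).foldl (pvStepB ids) ([], 0)).1 ++
        [PySem.List.slice ids (some ((pvBk ids t).foldl (pvStepB ids) ([], 0)).2) none] := rfl

-- A-side invariant: the current cluster is nonempty and ends with the last element seen.
lemma A_inv (t : Int) : ∀ (rest : List Int) (cls : List (List Int)) (cur : List Int), cur ≠ [] →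
    (rest.foldl (pvStepA t) (cls, cur)).2 ≠ [] ∧
    (rest.foldl (pvStepA t) (cls, cur)).2.getLastD 0 = (cur ++ rest).getLastD 0 := by
  intro rest
  induction rest with
  | nil => intro cls cur h; simp [h]
  | cons v vs ih =>
    intro cls cur h
    simp only [List.foldl_cons, pvStepA]
    by_cases hc : |v - cur.getLastD 0| ≤ t
    · rw [if_pos hc]
      refine (ih cls (cur ++ [v]) (by simp)).imp id (fun h2 => h2.trans ?_)
      simp
    · rw [if_neg hc]
      refine (ih (cls ++ [cur]) [v] (by simp)).imp id (fun h2 => h2.trans ?_)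
      obtain ⟨w, hw⟩ := Option.isSome_iff_exists.mp (by simp : (v :: vs).getLast?.isSome)
      simp [List.getLastD_eq_getLast?, List.getLast?_append, hw]

-- A's snoc recursion: appending one element either extends the last cluster or starts a new one.
lemma A_snoc (ids : List Int) (z t : Int) (h : ids ≠ []) :
    cluster_image_id (ids ++ [z]) t =
      if |z - ids.getLastD 0| ≤ t
      then (cluster_image_id ids t).dropLast ++ [(cluster_image_id ids t).getLastD [] ++ [z]]
      else cluster_image_id ids t ++ [[z]] := by
  obtain ⟨x, rest, rfl⟩ : ∃ x rest, ids = x :: rest := by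
    cases ids with | nil => exact absurd rfl h | cons a l => exact ⟨a, l, rfl⟩
  rw [show (x :: rest) ++ [z] = x :: (rest ++ [z]) from rfl, A_as_step, A_as_step,
      List.foldl_append]
  obtain ⟨hne, hlast⟩ := A_inv t rest [] [x] (by simp)
  simp only [List.foldl_cons, List.foldl_nil]
  rw [pvStepA]
  have hl : (List.foldl (pvStepA t) ([], [x]) rest).2.getLastD 0 = (x :: rest).getLastD 0 := by
    simpa using hlast
  rw [hl]
  by_cases hc : |z - (x :: rest).getLastD 0| ≤ t
  · rw [if_pos hc, if_pos hc]; simp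
  · rw [if_neg hc, if_neg hc]

lemma B_fold_snd (ids : List Int) : ∀ (bs : List Int) (cls : List (List Int)) (lo : Int),
    (bs.foldl (pvStepB ids) (cls, lo)).2 = bs.getLastD lo := by
  intro bs
  induction bs with
  | nil => simp
  | cons b bs ih =>
    intro cls lo
    simp only [List.foldl_cons, pvStepB, ih]
    cases bs with
    | nil => simp
    | cons c cs =>
      obtain ⟨w, hw⟩ := Option.isSome_iff_exists.mp (by simp : (c :: cs).getLast?.isSome)
      simp [hw]

lemma mem_Bk (ids : List Int) (t b : Int) (hb : b ∈ pvBk ids t) :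
    1 ≤ b ∧ b < (ids.length : Int) := by
  have := (List.mem_filter.mp hb).1
  exact (PySem.List.mem_pyRange_one).mp this

-- pyGetD ignores elements appended past the index.
lemma pvGetD_append (xs ys : List Int) (i : Int) (h0 : 0 ≤ i) (h1 : i < (xs.length : Int)) :
    PySem.List.pyGetD (xs ++ ys) i 0 = PySem.List.pyGetD xs i 0 := by
  rw [PySem.List.pyGetD_eq_getElem _ _ h0 (by simp; omega),
      PySem.List.pyGetD_eq_getElem _ _ h0 h1,
      List.getElem_append_left (by omega)]

-- break indices of ids ++ [z]: the old ones, plus len(ids) iff the new gap exceeds t.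
lemma Bk_snoc (ids : List Int) (z t : Int) (h : ids ≠ []) :
    pvBk (ids ++ [z]) t =
      pvBk ids t ++ (if t < |z - ids.getLastD 0| then [(ids.length : Int)] else []) := by
  have hn : 1 ≤ (ids.length : Int) := by
    have := List.length_pos_of_ne_nil h; omega
  unfold pvBk
  have hlen : (((ids ++ [z]).length : Nat) : Int) = (ids.length : Int) + 1 := by
    simp [List.length_append]
  rw [hlen, PySem.List.pyRange_one_succ_right hn, List.filter_append]
  congr 1
  · apply List.filter_congr
    intro i hi
    obtain ⟨h1, h2⟩ := PySem.List.mem_pyRange_one.mp hi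
    rw [pvGetD_append _ _ _ (by omega) h2, pvGetD_append _ _ _ (by omega) (by omega)]
  · have hg : PySem.List.pyGetD (ids ++ [z]) (ids.length : Int) 0 = z := by
      rw [PySem.List.pyGetD_eq_getElem _ _ (by omega) (by simp)]
      simp
    have hg' : PySem.List.pyGetD (ids ++ [z]) ((ids.length : Int) - 1) 0 = ids.getLastD 0 := by
      rw [pvGetD_append _ _ _ (by omega) (by omega),
          PySem.List.pyGetD_eq_getElem _ _ (by omega) (by omega)]
      rw [List.getLastD_eq_getLast?, List.getLast?_eq_getElem?]
      have h2 : ((ids.length : Int) - 1).toNat = ids.length - 1 := by omega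
      simp [h2, List.getElem?_eq_getElem (show ids.length - 1 < ids.length by omega)]
    simp only [List.filter, hg, hg']
    by_cases hc : t < |z - ids.getLastD 0| <;>
      simp only [List.getLastD_eq_getLast?] at hc ⊢ <;> simp [hc]

-- a slice with both bounds inside ids ignores an element appended behind them.
lemma slice_append_eq (ids : List Int) (z lo b : Int) (h0 : 0 ≤ lo) (h1 : lo ≤ (ids.length : Int))
    (h2 : 0 ≤ b) (h3 : b ≤ (ids.length : Int)) :
    PySem.List.slice (ids ++ [z]) (some lo) (some b) = PySem.List.slice ids (some lo) (some b) := by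
  rw [PySem.List.slice_toNat _ h0 h2, PySem.List.slice_toNat _ h0 h2,
      List.drop_append_of_le_length (by omega),
      List.take_append_of_le_length (by simp; omega)]

-- the slicing fold ignores an element appended past every break.
lemma B_fold_append (ids : List Int) (z : Int) :
    ∀ (bs : List Int) (cls : List (List Int)) (lo : Int), 0 ≤ lo → lo ≤ (ids.length : Int) →
      (∀ b ∈ bs, 0 ≤ b ∧ b ≤ (ids.length : Int)) →
      bs.foldl (pvStepB (ids ++ [z])) (cls, lo) = bs.foldl (pvStepB ids) (cls, lo) := by
  intro bs
  induction bs with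
  | nil => intro cls lo _ _ _; rfl
  | cons b bs ih =>
    intro cls lo h0 h1 hm
    obtain ⟨hb0, hb1⟩ := hm b List.mem_cons_self
    simp only [List.foldl_cons, pvStepB]
    rw [slice_append_eq ids z lo b h0 h1 hb0 hb1]
    exact ih _ b hb0 hb1 (fun c hc => hm c (List.mem_cons_of_mem _ hc))

lemma base_single (x t : Int) :
    cluster_image_id [x] t = [[x]] ∧ cluster_image_id_alt [x] t = [[x]] := by
  refine ⟨rfl, ?_⟩
  rw [B_as_step]
  have hbk : pvBk [x] t = [] := by
    unfold pvBk
    rw [show ((List.length [x] : Nat) : Int) = 1 by simp, PySem.List.pyRange_one_eq_nil le_rfl]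
    rfl
  rw [hbk]
  simp [PySem.List.slice_from _ (le_refl (0 : Int))]

-- B's snoc recursion, matching A_snoc.
lemma B_snoc (ids : List Int) (z t : Int) (h : ids ≠ []) :
    cluster_image_id_alt (ids ++ [z]) t =
      if |z - ids.getLastD 0| ≤ t
      then (cluster_image_id_alt ids t).dropLast ++ [(cluster_image_id_alt ids t).getLastD [] ++ [z]]
      else cluster_image_id_alt ids t ++ [[z]] := by
  have hn1 : 0 < ids.length := List.length_pos_of_ne_nil h
  rw [B_as_step, B_as_step, Bk_snoc ids z t h]
  have hmem : ∀ b ∈ pvBk ids t, 0 ≤ b ∧ b ≤ (ids.length : Int) := fun b hb => by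
    have := mem_Bk ids t b hb; exact ⟨by omega, by omega⟩
  have hfold := B_fold_append ids z (pvBk ids t) [] 0 le_rfl (by omega) hmem
  have hlo : 0 ≤ ((pvBk ids t).foldl (pvStepB ids) ([], 0)).2 ∧
      ((pvBk ids t).foldl (pvStepB ids) ([], 0)).2 ≤ (ids.length : Int) := by
    rw [B_fold_snd]
    cases hb : pvBk ids t with
    | nil => simp
    | cons c cs =>
      have hmm : (c :: cs).getLastD 0 ∈ c :: cs := List.mem_of_getLast? rfl
      exact hmem _ (hb ▸ hmm)
  by_cases hc : |z - ids.getLastD 0| ≤ t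
  · rw [if_neg (not_lt.mpr hc), if_pos hc, List.append_nil, hfold]
    rw [PySem.List.slice_from _ hlo.1, PySem.List.slice_from _ hlo.1,
        List.drop_append_of_le_length (by omega)]
    simp
  · rw [if_pos (not_le.mp hc), if_neg hc, List.foldl_append, hfold]
    simp only [List.foldl_cons, List.foldl_nil, pvStepB]
    rw [PySem.List.slice_toNat _ hlo.1 (by omega),
        List.drop_append_of_le_length (by omega),
        List.take_append_of_le_length (by simp only [List.length_drop]; omega),
        List.take_of_length_le (by simp only [List.length_drop]; omega),
        PySem.List.slice_from _ hlo.1, PySem.List.slice_from _ (by omega : (0:Int) ≤ (ids.length : Int))]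
    rw [show ((ids.length : Int)).toNat = ids.length by omega]
    simp

lemma main_eq (ids : List Int) (t : Int) (h : ids ≠ []) :
    cluster_image_id ids t = cluster_image_id_alt ids t := by
  induction ids using List.reverseRecOn with
  | nil => exact absurd rfl h
  | append_singleton ids z ih =>
    cases ids with
    | nil => simpa using ((base_single z t).1.trans (base_single z t).2.symm)
    | cons y ys =>
      rw [A_snoc _ _ _ (by simp), B_snoc _ _ _ (by simp), ih (by simp)]

-- ===== VERDICT (by name: the statement is the Claim_ definition above) =====
theorem cluster_image_id_spec : Claim_equal_cluster_image_id := by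
  intro ids t _ hpre
  exact main_eq ids t hpre
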